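-- pv_equiv track=rewrite | github.com/devMingu/codeTest | 프로그래머스/대충만든 자판.py | make_sequence_of_keyboard
-- ===== SOURCE A (Python) =====
-- def make_sequence_of_keyboard(keymap):
--     keyboard = {}
--
--     for key_pos in keymap:
--         pos = 1
--         for el in key_pos:
--             if el not in keyboard:
--                 keyboard[el] = pos
--             else:
--                 prev_pos = keyboard[el]
--                 if prev_pos > pos:
--                     keyboard[el] = pos
--             pos += 1
--     return keyboard
-- ===== SOURCE B (Python) =====
-- def make_sequence_of_keyboard(keymap):
--     positions = {}
--     for key_pos in keymap:
--         for pos, el in enumerate(key_pos, 1):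
--             positions.setdefault(el, []).append(pos)
--     return {el: min(ps) for el, ps in positions.items()}
-- ===== Notes on version B (the rewrite author's own statement) =====
-- stated objective: alternative
-- what changed: A keeps a running minimum per key inline during the scan; B first groups all 1-indexed positions of each key into lists (setdefault/append) and then reduces each list to its minimum in a separate comprehension pass.
import Mathlib
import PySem

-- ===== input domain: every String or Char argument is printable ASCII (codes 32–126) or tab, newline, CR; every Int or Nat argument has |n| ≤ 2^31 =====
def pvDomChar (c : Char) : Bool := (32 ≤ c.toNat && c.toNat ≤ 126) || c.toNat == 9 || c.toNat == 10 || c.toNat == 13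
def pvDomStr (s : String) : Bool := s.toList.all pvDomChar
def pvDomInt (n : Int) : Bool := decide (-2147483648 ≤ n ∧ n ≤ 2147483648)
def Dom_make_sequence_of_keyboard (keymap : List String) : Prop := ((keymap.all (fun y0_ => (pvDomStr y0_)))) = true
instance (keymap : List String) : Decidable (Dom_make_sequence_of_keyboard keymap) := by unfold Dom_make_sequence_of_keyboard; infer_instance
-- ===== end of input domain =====

-- B groups all 1-indexed positions per key first and takes each minimum in a second pass,
-- instead of A's inline running minimum; same return value, no speed claim (objective: alternative).

-- ===== PORT A =====
-- one character-step of A's inner loop (the if/else on membership, then the prev_pos comparison)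
def pvStepA (keyboard : PySem.Dict String Int) (el : String) (pos : Int) : PySem.Dict String Int :=
  if keyboard.contains el = false then keyboard.insert el pos
  else
    let prev_pos := keyboard.getD el 0
    if prev_pos > pos then keyboard.insert el pos else keyboard

def make_sequence_of_keyboard (keymap : List String) : List (String × Int) :=
  (keymap.foldl
    (fun keyboard key_pos =>
      (key_pos.toList.foldl
        (fun (st : PySem.Dict String Int × Int) el => (pvStepA st.1 (String.ofList [el]) st.2, st.2 + 1))
        (keyboard, 1)).1)
    PySem.Dict.empty).items

-- ===== PORT B =====
-- python: min(ps)  (ps is never empty here; the getD default is unreachable)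
def pvMin (ps : List Int) : Int := (PySem.List.min? ps (fun x => x)).getD 0

def make_sequence_of_keyboard_alt (keymap : List String) : List (String × Int) :=
  let positions := keymap.foldl
    (fun (d : PySem.Dict String (List Int)) key_pos =>
      (PySem.List.enumerate key_pos.toList 1).foldl
        (fun d pe => d.modify (String.ofList [pe.2]) [] (· ++ [pe.1])) d)
    PySem.Dict.empty
  (PySem.Dict.mk (positions.items.map (fun p => (p.1, pvMin p.2)))).items

-- ===== PRECONDITION & SPEC =====
def Spec_make_sequence_of_keyboard (keymap : List String) (out : List (String × Int)) : Prop := out = make_sequence_of_keyboard_alt keymap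
instance (keymap : List String) (out : List (String × Int)) : Decidable (Spec_make_sequence_of_keyboard keymap out) := by unfold Spec_make_sequence_of_keyboard; infer_instance

-- ===== CLAIM (what is proved, stated in full; the proofs are below) =====
def Claim_equal_make_sequence_of_keyboard : Prop := ∀ (keymap : List String), Dom_make_sequence_of_keyboard keymap → Spec_make_sequence_of_keyboard keymap (make_sequence_of_keyboard keymap)

-- ===== LEMMAS AND PROOFS =====

-- the invariant tying A's dict to B's dict: same keys in the same order, A's value = min of B's list
def pvInv (d1 : PySem.Dict String Int) (d2 : PySem.Dict String (List Int)) : Prop :=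
  d2.keys.Nodup ∧ d1.items = d2.items.map (fun p => (p.1, pvMin p.2)) ∧ ∀ p ∈ d2.items, p.2 ≠ []

theorem pvMin_append (l : List Int) (x : Int) (h : l ≠ []) :
    pvMin (l ++ [x]) = min (pvMin l) x := by
  obtain ⟨a, t, rfl⟩ := List.exists_cons_of_ne_nil h
  simp [pvMin, PySem.List.min?_id_cons, List.foldl_append]

theorem pvStep_inv (d1 : PySem.Dict String Int) (d2 : PySem.Dict String (List Int))
    (k : String) (p : Int) (h : pvInv d1 d2) :
    pvInv (pvStepA d1 k p) (d2.modify k [] (· ++ [p])) := by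
  obtain ⟨hnd, hit, hne⟩ := h
  have hkeys : d1.keys = d2.keys := by
    simp only [PySem.Dict.keys, hit, List.map_map]; rfl
  have hc1 : d1.contains k = d2.contains k := by
    rw [PySem.Dict.contains_eq_decide_mem_keys, PySem.Dict.contains_eq_decide_mem_keys, hkeys]
  have hnd1 : d1.keys.Nodup := by rw [hkeys]; exact hnd
  by_cases hc : d2.contains k = true
  · -- key already present in both dicts
    obtain ⟨l, hl⟩ : ∃ l, d2.get? k = some l := by
      have h2 := PySem.Dict.contains_eq_isSome_get? d2 k
      rw [hc] at h2
      exact Option.isSome_iff_exists.mp h2.symm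
    have hlmem : (k, l) ∈ d2.items := (PySem.Dict.get?_eq_some_iff_mem_items d2 k l hnd).mp hl
    have hlne : l ≠ [] := hne _ hlmem
    have hgd2 : d2.getD k [] = l := PySem.Dict.getD_of_mem_items d2 hlmem hnd []
    have hmem1 : (k, pvMin l) ∈ d1.items := by
      rw [hit]; exact List.mem_map_of_mem hlmem
    have hprev : d1.getD k 0 = pvMin l := PySem.Dict.getD_of_mem_items d1 hmem1 hnd1 0
    have hc1' : d1.contains k = true := by rw [hc1]; exact hc
    have hBitems : (d2.modify k [] (· ++ [p])).items
        = d2.items.map (fun q => if (q.1 == k) = true then (k, l ++ [p]) else q) := by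
      simp only [PySem.Dict.modify, hgd2]
      exact PySem.Dict.items_insert_of_contains d2 _ hc
    have huniq : ∀ q ∈ d2.items, q.1 = k → q = (k, l) := by
      intro q hq hqk
      exact List.inj_on_of_nodup_map hnd hq hlmem (by simpa using hqk)
    refine ⟨?_, ?_, ?_⟩
    · simp only [PySem.Dict.modify]
      exact PySem.Dict.nodup_keys_insert d2 k _ hnd
    · rw [hBitems, List.map_map]
      simp only [pvStepA, hc1', hprev]
      rw [if_neg (by simp : ¬ (true = false))]
      by_cases hgt : pvMin l > p
      · rw [if_pos hgt, PySem.Dict.items_insert_of_contains d1 p hc1', hit, List.map_map]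
        refine List.map_congr_left ?_
        intro q hq
        by_cases hqk : q.1 = k
        · rw [huniq q hq hqk]
          simp [pvMin_append l p hlne, min_eq_right (le_of_lt hgt)]
        · simp [hqk]
      · rw [if_neg hgt, hit]
        refine List.map_congr_left ?_
        intro q hq
        by_cases hqk : q.1 = k
        · rw [huniq q hq hqk]
          simp [pvMin_append l p hlne, min_eq_left (not_lt.mp hgt)]
        · simp [hqk]
    · intro q hq
      rw [hBitems] at hq
      obtain ⟨r, hr, hrq⟩ := List.mem_map.mp hq
      by_cases hrk : (r.1 == k) = true
      · rw [if_pos hrk] at hrq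
        rw [← hrq]
        simp
      · rw [if_neg hrk] at hrq
        rw [← hrq]
        exact hne r hr
  · -- fresh key in both dicts
    have hc' : d2.contains k = false := by simpa using hc
    have hc1' : d1.contains k = false := by rw [hc1]; exact hc'
    have hgd2 : d2.getD k [] = [] := PySem.Dict.getD_of_not_contains d2 [] hc'
    have hBitems : (d2.modify k [] (· ++ [p])).items = d2.items ++ [(k, [p])] := by
      simp only [PySem.Dict.modify, hgd2, List.nil_append]
      exact PySem.Dict.items_insert_of_not_contains d2 _ hc'
    refine ⟨?_, ?_, ?_⟩
    · simp only [PySem.Dict.modify]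
      exact PySem.Dict.nodup_keys_insert d2 k _ hnd
    · simp only [pvStepA, hc1', if_true]
      rw [PySem.Dict.items_insert_of_not_contains d1 p hc1', hBitems, List.map_append, hit]
      simp [pvMin, PySem.List.min?_id_cons]
    · intro q hq
      rw [hBitems] at hq
      rcases List.mem_append.mp hq with hq' | hq'
      · exact hne q hq'
      · simp at hq'
        rw [hq']
        simp

theorem pvInner_inv (s : List Char) (p : Int)
    (d1 : PySem.Dict String Int) (d2 : PySem.Dict String (List Int)) (h : pvInv d1 d2) :
    pvInv
      ((s.foldl (fun (st : PySem.Dict String Int × Int) el => (pvStepA st.1 (String.ofList [el]) st.2, st.2 + 1)) (d1, p)).1)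
      ((PySem.List.enumerate s p).foldl (fun d pe => d.modify (String.ofList [pe.2]) [] (· ++ [pe.1])) d2) := by
  induction s generalizing p d1 d2 with
  | nil => simpa [PySem.List.enumerate_nil] using h
  | cons c t ih =>
    simp only [List.foldl_cons, PySem.List.enumerate_cons]
    exact ih (p + 1) _ _ (pvStep_inv d1 d2 (String.ofList [c]) p h)

theorem pvOuter_inv (keymap : List String)
    (d1 : PySem.Dict String Int) (d2 : PySem.Dict String (List Int)) (h : pvInv d1 d2) :
    pvInv
      (keymap.foldl (fun keyboard key_pos =>
        (key_pos.toList.foldl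
          (fun (st : PySem.Dict String Int × Int) el => (pvStepA st.1 (String.ofList [el]) st.2, st.2 + 1))
          (keyboard, 1)).1) d1)
      (keymap.foldl (fun (d : PySem.Dict String (List Int)) key_pos =>
        (PySem.List.enumerate key_pos.toList 1).foldl
          (fun d pe => d.modify (String.ofList [pe.2]) [] (· ++ [pe.1])) d) d2) := by
  induction keymap generalizing d1 d2 with
  | nil => simpa using h
  | cons s t ih =>
    simp only [List.foldl_cons]
    exact ih _ _ (pvInner_inv s.toList 1 d1 d2 h)

-- ===== VERDICT (by name: the statement is the Claim_ definition above) =====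
theorem make_sequence_of_keyboard_spec : Claim_equal_make_sequence_of_keyboard := by
  intro keymap _
  unfold Spec_make_sequence_of_keyboard make_sequence_of_keyboard make_sequence_of_keyboard_alt
  have h := pvOuter_inv keymap PySem.Dict.empty PySem.Dict.empty ⟨by simp [PySem.Dict.empty, PySem.Dict.keys], by rfl, by intro p hp; simp [PySem.Dict.empty] at hp⟩
  exact h.2.1
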